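-- pv_equiv track=rewrite | github.com/marcelomatus/gtopt | tools/check_latex_math.py | _find_inline_math
-- ===== SOURCE A (Python) =====
-- def _is_escaped(text: str, pos: int) -> bool:
--     """Return True if the character at *pos* is preceded by an odd number of backslashes."""
--     n = 0
--     while pos - 1 - n >= 0 and text[pos - 1 - n] == "\\":
--         n += 1
--     return n % 2 == 1
--
-- def _find_inline_math(line: str) -> list[tuple[int, int]]:
--     """Return (start, end) character positions of ``$...$`` spans in *line*.
--
--     Skips ``$$`` (display math) and escaped ``\\$``.
--     """
--     spans: list[tuple[int, int]] = []
--     pos = 0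
--     while pos < len(line):
--         # Skip escaped dollars (odd number of preceding backslashes)
--         if line[pos] == "$" and _is_escaped(line, pos):
--             pos += 1
--             continue
--         # Skip display-math markers
--         if line[pos : pos + 2] == "$$":
--             pos += 2
--             continue
--         if line[pos] == "$":
--             # Look for closing $
--             end = pos + 1
--             while end < len(line):
--                 if line[end] == "$" and not _is_escaped(line, end):
--                     if end + 1 < len(line) and line[end + 1] == "$":
--                         end += 2
--                         continue
--                     spans.append((pos, end + 1))
--                     pos = end + 1
--                     break
--                 end += 1
--             else:
--                 # No closing $ found on this line
--                 pos += 1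
--         else:
--             pos += 1
--     return spans
-- ===== SOURCE B (Python) =====
-- def _find_inline_math(line):
--     """Return (start, end) character positions of ``$...$`` spans in *line*.
--
--     One linear pass: escaped-ness is precomputed from the running backslash
--     run length, and an open/closed state machine emits the spans.
--     """
--     n = len(line)
--     esc = [False] * n
--     run = 0
--     for i, ch in enumerate(line):
--         esc[i] = run % 2 == 1
--         run = run + 1 if ch == "\\" else 0
--     spans = []
--     start = None
--     i = 0
--     while i < n:
--         if line[i] == "$" and not esc[i]:
--             if i + 1 < n and line[i + 1] == "$":
--                 i += 2
--                 continue
--             if start is None: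
--                 start = i
--             else:
--                 spans.append((start, i + 1))
--                 start = None
--         i += 1
--     return spans
-- ===== Notes on version B (the rewrite author's own statement) =====
-- stated objective: faster
-- what changed: Replaces A's backtracking outer/inner double scan with per-call backslash counting by a single left-to-right pass: escaped-ness is precomputed from the running backslash-run length and one open/closed state machine emits the spans.
import Mathlib
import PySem

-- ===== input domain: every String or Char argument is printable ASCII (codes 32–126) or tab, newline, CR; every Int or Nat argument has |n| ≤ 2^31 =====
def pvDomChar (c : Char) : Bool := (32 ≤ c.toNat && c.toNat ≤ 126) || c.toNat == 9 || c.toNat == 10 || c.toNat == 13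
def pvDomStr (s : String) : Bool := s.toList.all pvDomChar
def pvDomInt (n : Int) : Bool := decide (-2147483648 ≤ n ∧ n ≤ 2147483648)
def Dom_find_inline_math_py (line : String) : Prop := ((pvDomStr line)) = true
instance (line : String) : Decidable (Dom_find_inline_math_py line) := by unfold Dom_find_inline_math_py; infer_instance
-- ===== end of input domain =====

-- B replaces A's backtracking two-level scan (with a backward backslash count at each '$')
-- by one left-to-right pass: a precomputed backslash-run parity array and an open/closed state machine.
-- Loops are ported as structural recursion on a fuel that provably dominates the loop's measure
-- (pos/e/i strictly increase, so `pos` resp. `l.length` steps always suffice; fuel 0 is never reached).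

-- ===== PORT A =====
-- _is_escaped's `while` loop: count backslashes backwards from pos-1 (n increases, n < pos, so fuel = pos suffices)
def cntEscA (text : List Char) (pos n : Nat) : Nat → Nat
  | 0 => n
  | fuel + 1 =>
    if 1 + n ≤ pos ∧ text.getD (pos - 1 - n) ' ' = '\\' then cntEscA text pos (n + 1) fuel else n

def isEscapedA (text : List Char) (pos : Nat) : Bool := cntEscA text pos 0 pos % 2 == 1

-- inner `while end < len(line)` loop: returns the closing index, none = the for-else branch
def innerA (l : List Char) (e : Nat) : Nat → Option Nat
  | 0 => none
  | fuel + 1 =>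
    if e < l.length then
      if l.getD e ' ' = '$' ∧ ¬ (isEscapedA l e = true) then
        if e + 1 < l.length ∧ l.getD (e + 1) ' ' = '$' then innerA l (e + 2) fuel
        else some e
      else innerA l (e + 1) fuel
    else none

-- outer `while pos < len(line)` loop, spans accumulated in acc
def outerA (l : List Char) (pos : Nat) (acc : List (Int × Int)) : Nat → List (Int × Int)
  | 0 => acc
  | fuel + 1 =>
    if pos < l.length then
      if l.getD pos ' ' = '$' ∧ isEscapedA l pos = true then outerA l (pos + 1) acc fuel
      -- line[pos:pos+2] == "$$"  (slice of nonnegative in-range indices = take 2 ∘ drop pos)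
      else if (l.drop pos).take 2 = ['$', '$'] then outerA l (pos + 2) acc fuel
      else if l.getD pos ' ' = '$' then
        match innerA l (pos + 1) l.length with
        | some e => outerA l (e + 1) (acc ++ [((pos : Int), (e : Int) + 1)]) fuel
        | none => outerA l (pos + 1) acc fuel
      else outerA l (pos + 1) acc fuel
    else acc

def find_inline_math_py (line : String) : List (Int × Int) :=
  outerA line.toList 0 [] line.toList.length

-- ===== PORT B =====
-- esc[i] = (run of backslashes immediately before i is odd), computed in one forward pass
def escAux (l : List Char) (run : Nat) : List Bool :=
  match l with
  | [] => []
  | c :: t => (run % 2 == 1) :: escAux t (if c = '\\' then run + 1 else 0)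

-- the single `while i < n` state machine (start = the pending opening '$', if any)
def scanB (l : List Char) (esc : List Bool) (i : Nat) (start : Option Nat)
    (acc : List (Int × Int)) : Nat → List (Int × Int)
  | 0 => acc
  | fuel + 1 =>
    if i < l.length then
      if l.getD i ' ' = '$' ∧ esc.getD i false = false then
        if i + 1 < l.length ∧ l.getD (i + 1) ' ' = '$' then scanB l esc (i + 2) start acc fuel
        else
          match start with
          | none => scanB l esc (i + 1) (some i) acc fuel
          | some s => scanB l esc (i + 1) none (acc ++ [((s : Int), (i : Int) + 1)]) fuel
      else scanB l esc (i + 1) start acc fuel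
    else acc

def find_inline_math_py_alt (line : String) : List (Int × Int) :=
  scanB line.toList (escAux line.toList 0) 0 none [] line.toList.length

-- ===== PRECONDITION & SPEC =====
def Spec_find_inline_math_py (line : String) (out : List (Int × Int)) : Prop := out = find_inline_math_py_alt line
instance (line : String) (out : List (Int × Int)) : Decidable (Spec_find_inline_math_py line out) := by unfold Spec_find_inline_math_py; infer_instance

-- ===== CLAIM (what is proved, stated in full; the proofs are below) =====
def Claim_equal_find_inline_math_py : Prop := ∀ (line : String), Dom_find_inline_math_py line → Spec_find_inline_math_py line (find_inline_math_py line)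

-- ===== LEMMAS AND PROOFS =====

-- canonical spec of the backslash run ending just before index i (seed `run` for index 0)
def cntS (l : List Char) (run : Nat) : Nat → Nat
  | 0 => run
  | i + 1 => if l.getD i ' ' = '\\' then cntS l run i + 1 else 0

theorem cntEscA_eq (l : List Char) :
    ∀ (p pos n f : Nat), pos - n = p → p ≤ f → n ≤ pos →
      cntEscA l pos n f = n + cntS l 0 (pos - n) := by
  intro p
  induction p with
  | zero =>
    intro pos n f hp hf hn
    have : cntEscA l pos n f = n := by
      cases f with
      | zero => rfl
      | succ f => exact if_neg (by omega)
    rw [this, hp]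
    rfl
  | succ q ih =>
    intro pos n f hp hf hn
    obtain ⟨f, rfl⟩ : ∃ f', f = f' + 1 := ⟨f - 1, by omega⟩
    rw [cntEscA]
    have hq : pos - 1 - n = q := by omega
    by_cases hc : l.getD (pos - 1 - n) ' ' = '\\'
    · rw [if_pos ⟨by omega, hc⟩, ih pos (n + 1) f (by omega) (by omega) (by omega)]
      rw [(by omega : pos - (n + 1) = q), (by omega : pos - n = q + 1)]
      have hcq : l.getD q ' ' = '\\' := hq ▸ hc
      show n + 1 + cntS l 0 q = n + (if l.getD q ' ' = '\\' then cntS l 0 q + 1 else 0)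
      rw [if_pos hcq]
      omega
    · rw [if_neg (by tauto), (by omega : pos - n = q + 1)]
      have hcq : ¬ l.getD q ' ' = '\\' := hq ▸ hc
      show n = n + (if l.getD q ' ' = '\\' then cntS l 0 q + 1 else 0)
      rw [if_neg hcq]
      omega

theorem isEscapedA_eq (l : List Char) (pos : Nat) :
    isEscapedA l pos = (cntS l 0 pos % 2 == 1) := by
  unfold isEscapedA
  rw [cntEscA_eq l pos pos 0 pos (by omega) (by omega) (by omega)]
  simp

theorem cntS_shift (c : Char) (t : List Char) (run : Nat) :
    ∀ i, cntS (c :: t) run (i + 1) = cntS t (if c = '\\' then run + 1 else 0) i := by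
  intro i
  induction i with
  | zero => simp [cntS, List.getD]
  | succ j ih =>
    have h1 : cntS (c :: t) run (j + 1 + 1)
        = if (c :: t).getD (j + 1) ' ' = '\\' then cntS (c :: t) run (j + 1) + 1 else 0 := rfl
    have h2 : cntS t (if c = '\\' then run + 1 else 0) (j + 1)
        = if t.getD j ' ' = '\\' then cntS t (if c = '\\' then run + 1 else 0) j + 1 else 0 := rfl
    rw [h1, h2, ih, List.getD_cons_succ]

theorem escAux_getD (l : List Char) :
    ∀ (run i : Nat), i < l.length → (escAux l run).getD i false = (cntS l run i % 2 == 1) := by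
  induction l with
  | nil => intro run i h; simp at h
  | cons c t ih =>
    intro run i h
    cases i with
    | zero => simp [escAux, cntS]
    | succ j =>
      simp only [escAux, List.getD_cons_succ]
      rw [ih _ j (by simpa using h), cntS_shift]

theorem escB_eq (l : List Char) (i : Nat) (h : i < l.length) :
    (escAux l 0).getD i false = isEscapedA l i := by
  rw [escAux_getD l 0 i h, isEscapedA_eq]

-- the "$$" slice test, characterised
theorem slice_iff (l : List Char) (pos : Nat) (h : pos < l.length) :
    (l.drop pos).take 2 = ['$', '$'] ↔
      l.getD pos ' ' = '$' ∧ pos + 1 < l.length ∧ l.getD (pos + 1) ' ' = '$' := by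
  by_cases h1 : pos + 1 < l.length
  · rw [List.drop_eq_getElem_cons h, List.drop_eq_getElem_cons h1]
    simp only [List.take_succ_cons, List.cons.injEq,
      List.getD_eq_getElem l ' ' h, List.getD_eq_getElem l ' ' h1]
    constructor
    · rintro ⟨ha, hb, -⟩; exact ⟨ha, h1, hb⟩
    · rintro ⟨ha, -, hb⟩; exact ⟨ha, hb, rfl⟩
  · have hnil : l.drop (pos + 1) = [] := by
      apply List.eq_nil_of_length_eq_zero; simp; omega
    rw [List.drop_eq_getElem_cons h, hnil]
    simp [h1]

-- enough fuel: innerA's value does not depend on the fuel once it dominates the measure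
theorem inner_fuel (l : List Char) :
    ∀ (f g e : Nat), l.length - e ≤ f → l.length - e ≤ g → innerA l e f = innerA l e g := by
  intro f
  induction f with
  | zero =>
    intro g e hf hg
    cases g with
    | zero => rfl
    | succ g => rw [innerA, innerA, if_neg (by omega)]
  | succ f ih =>
    intro g e hf hg
    cases g with
    | zero => rw [innerA, innerA, if_neg (by omega)]
    | succ g =>
      rw [innerA, innerA]
      by_cases he : e < l.length
      · rw [if_pos he, if_pos he]
        by_cases hc : l.getD e ' ' = '$' ∧ ¬(isEscapedA l e = true)
        · rw [if_pos hc, if_pos hc]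
          by_cases hsk : e + 1 < l.length ∧ l.getD (e + 1) ' ' = '$'
          · rw [if_pos hsk, if_pos hsk]
            exact ih g (e + 2) (by omega) (by omega)
          · rw [if_neg hsk, if_neg hsk]
        · rw [if_neg hc, if_neg hc]
          exact ih g (e + 1) (by omega) (by omega)
      · rw [if_neg he, if_neg he]

-- innerA returns an index at or beyond its starting point
theorem innerA_le (l : List Char) :
    ∀ (f e e' : Nat), innerA l e f = some e' → e ≤ e' := by
  intro f
  induction f with
  | zero => intro e e' h; exact absurd h (by simp [innerA])
  | succ f ih =>
    intro e e' h
    rw [innerA] at h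
    by_cases he : e < l.length
    · rw [if_pos he] at h
      split at h
      · split at h
        · have := ih (e + 2) e' h; omega
        · cases h; omega
      · have := ih (e + 1) e' h; omega
    · rw [if_neg he] at h; exact absurd h (by simp)

-- a failed inner scan: the rest of the line yields nothing more for A
theorem outer_dead (l : List Char) :
    ∀ (f p : Nat) (acc : List (Int × Int)), l.length - p ≤ f → innerA l p f = none →
      outerA l p acc f = acc := by
  intro f
  induction f with
  | zero => intro p acc hk _; rfl
  | succ f ih =>
    intro p acc hk hin
    rw [innerA] at hin
    rw [outerA]
    by_cases hp : p < l.length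
    · rw [if_pos hp] at hin
      rw [if_pos hp]
      by_cases hc : l.getD p ' ' = '$'
      · by_cases hesc : isEscapedA l p = true
        · rw [if_pos ⟨hc, hesc⟩]
          rw [if_neg (show ¬(l.getD p ' ' = '$' ∧ ¬ isEscapedA l p = true) by tauto)] at hin
          exact ih (p + 1) acc (by omega) hin
        · rw [if_neg (show ¬(l.getD p ' ' = '$' ∧ isEscapedA l p = true) by tauto)]
          rw [if_pos ⟨hc, hesc⟩] at hin
          by_cases hsk : p + 1 < l.length ∧ l.getD (p + 1) ' ' = '$'
          · rw [if_pos ((slice_iff l p hp).mpr ⟨hc, hsk.1, hsk.2⟩)]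
            rw [if_pos hsk] at hin
            exact ih (p + 2) acc (by omega) hin
          · rw [if_neg hsk] at hin
            exact absurd hin (by simp)
      · rw [if_neg (show ¬(l.getD p ' ' = '$' ∧ isEscapedA l p = true) by tauto),
          if_neg (show ¬((l.drop p).take 2 = ['$', '$']) by rw [slice_iff l p hp]; tauto),
          if_neg hc]
        rw [if_neg (show ¬(l.getD p ' ' = '$' ∧ ¬ isEscapedA l p = true) by tauto)] at hin
        exact ih (p + 1) acc (by omega) hin
    · rw [if_neg hp]

-- a failed inner scan: the rest of the line yields nothing more for B either
theorem scan_dead (l : List Char) :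
    ∀ (f e s : Nat) (acc : List (Int × Int)), l.length - e ≤ f → innerA l e f = none →
      scanB l (escAux l 0) e (some s) acc f = acc := by
  intro f
  induction f with
  | zero => intro e s acc hk _; rfl
  | succ f ih =>
    intro e s acc hk hin
    rw [innerA] at hin
    rw [scanB]
    by_cases he : e < l.length
    · rw [if_pos he] at hin
      rw [if_pos he]
      by_cases hc : l.getD e ' ' = '$' ∧ ¬(isEscapedA l e = true)
      · rw [if_pos hc] at hin
        rw [if_pos (show l.getD e ' ' = '$' ∧ (escAux l 0).getD e false = false by
          exact ⟨hc.1, by rw [escB_eq l e he]; simpa using hc.2⟩)]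
        by_cases hsk : e + 1 < l.length ∧ l.getD (e + 1) ' ' = '$'
        · rw [if_pos hsk] at hin
          rw [if_pos hsk]
          exact ih (e + 2) s acc (by omega) hin
        · rw [if_neg hsk] at hin
          exact absurd hin (by simp)
      · rw [if_neg hc] at hin
        rw [if_neg (show ¬(l.getD e ' ' = '$' ∧ (escAux l 0).getD e false = false) by
          rw [escB_eq l e he]; simpa using hc)]
        exact ih (e + 1) s acc (by omega) hin
    · rw [if_neg he]

-- enough fuel: scanB's value does not depend on the fuel once it dominates the measure
theorem scan_fuel (l : List Char) (esc : List Bool) :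
    ∀ (f g i : Nat) (st : Option Nat) (acc : List (Int × Int)),
      l.length - i ≤ f → l.length - i ≤ g → scanB l esc i st acc f = scanB l esc i st acc g := by
  intro f
  induction f with
  | zero =>
    intro g i st acc hf hg
    cases g with
    | zero => rfl
    | succ g =>
      simp only [scanB]
      rw [if_neg (by omega)]
  | succ f ih =>
    intro g i st acc hf hg
    cases g with
    | zero =>
      simp only [scanB]
      rw [if_neg (by omega)]
    | succ g =>
      simp only [scanB]
      by_cases hi : i < l.length
      · rw [if_pos hi, if_pos hi]
        by_cases hc : l.getD i ' ' = '$' ∧ esc.getD i false = false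
        · rw [if_pos hc, if_pos hc]
          by_cases hsk : i + 1 < l.length ∧ l.getD (i + 1) ' ' = '$'
          · rw [if_pos hsk, if_pos hsk]
            exact ih g (i + 2) st acc (by omega) (by omega)
          · rw [if_neg hsk, if_neg hsk]
            cases st with
            | none => exact ih g (i + 1) (some i) acc (by omega) (by omega)
            | some s => exact ih g (i + 1) none (acc ++ [((s : Int), (i : Int) + 1)]) (by omega) (by omega)
        · rw [if_neg hc, if_neg hc]
          exact ih g (i + 1) st acc (by omega) (by omega)
      · rw [if_neg hi, if_neg hi]

-- a successful inner scan matches B's in-span state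
theorem scan_found (l : List Char) :
    ∀ (f g e s e' : Nat) (acc : List (Int × Int)),
      l.length - e ≤ f → l.length - (e' + 1) ≤ g → innerA l e f = some e' →
      scanB l (escAux l 0) e (some s) acc f
        = scanB l (escAux l 0) (e' + 1) none (acc ++ [((s : Int), (e' : Int) + 1)]) g := by
  intro f
  induction f with
  | zero => intro g e s e' acc hf hg hin; exact absurd hin (by simp [innerA])
  | succ f ih =>
    intro g e s e' acc hf hg hin
    rw [innerA] at hin
    conv_lhs => rw [scanB]
    by_cases he : e < l.length
    · rw [if_pos he] at hin
      rw [if_pos he]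
      by_cases hc : l.getD e ' ' = '$' ∧ ¬(isEscapedA l e = true)
      · rw [if_pos hc] at hin
        rw [if_pos (show l.getD e ' ' = '$' ∧ (escAux l 0).getD e false = false by
          exact ⟨hc.1, by rw [escB_eq l e he]; simpa using hc.2⟩)]
        by_cases hsk : e + 1 < l.length ∧ l.getD (e + 1) ' ' = '$'
        · rw [if_pos hsk] at hin
          rw [if_pos hsk]
          exact ih g (e + 2) s e' acc (by omega) hg hin
        · rw [if_neg hsk] at hin
          rw [if_neg hsk]
          cases hin
          exact scan_fuel l (escAux l 0) f g (e + 1) none (acc ++ [((s : Int), (e : Int) + 1)]) (by omega) hg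
      · rw [if_neg hc] at hin
        rw [if_neg (show ¬(l.getD e ' ' = '$' ∧ (escAux l 0).getD e false = false) by
          rw [escB_eq l e he]; simpa using hc)]
        exact ih g (e + 1) s e' acc (by omega) hg hin
    · rw [if_neg he] at hin
      exact absurd hin (by simp)

-- main simulation: A's outer loop = B's state machine with no span open
theorem outer_eq_scan (l : List Char) :
    ∀ (f g pos : Nat) (acc : List (Int × Int)), l.length - pos ≤ f → l.length - pos ≤ g →
      outerA l pos acc f = scanB l (escAux l 0) pos none acc g := by
  intro f
  induction f with
  | zero =>
    intro g pos acc hf hg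
    cases g with
    | zero => rfl
    | succ g => rw [outerA, scanB, if_neg (by omega)]
  | succ f ih =>
    intro g pos acc hf hg
    by_cases hp : pos < l.length
    · obtain ⟨g, rfl⟩ : ∃ g', g = g' + 1 := ⟨g - 1, by omega⟩
      rw [outerA]
      conv_rhs => rw [scanB]
      rw [if_pos hp, if_pos hp]
      by_cases hc : l.getD pos ' ' = '$'
      · by_cases hesc : isEscapedA l pos = true
        · rw [if_pos ⟨hc, hesc⟩,
            if_neg (show ¬(l.getD pos ' ' = '$' ∧ (escAux l 0).getD pos false = false) by
              rw [escB_eq l pos hp]; simp [hesc])]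
          exact ih g (pos + 1) acc (by omega) (by omega)
        · rw [if_neg (show ¬(l.getD pos ' ' = '$' ∧ isEscapedA l pos = true) by tauto),
            if_pos (show l.getD pos ' ' = '$' ∧ (escAux l 0).getD pos false = false by
              exact ⟨hc, by rw [escB_eq l pos hp]; simpa using hesc⟩)]
          by_cases hsk : pos + 1 < l.length ∧ l.getD (pos + 1) ' ' = '$'
          · rw [if_pos ((slice_iff l pos hp).mpr ⟨hc, hsk.1, hsk.2⟩), if_pos hsk]
            exact ih g (pos + 2) acc (by omega) (by omega)
          · rw [if_neg (show ¬((l.drop pos).take 2 = ['$', '$']) by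
                rw [slice_iff l pos hp]; tauto),
              if_pos hc, if_neg hsk]
            cases hin : innerA l (pos + 1) l.length with
            | some e =>
              have h1 : pos + 1 ≤ e := innerA_le l l.length (pos + 1) e hin
              have hin' : innerA l (pos + 1) g = some e := by
                rw [inner_fuel l g l.length (pos + 1) (by omega) (by omega)]
                exact hin
              rw [scan_found l g l.length (pos + 1) pos e acc (by omega) (by omega) hin']
              exact ih l.length (e + 1) (acc ++ [((pos : Int), (e : Int) + 1)]) (by omega) (by omega)
            | none =>
              have hin' : innerA l (pos + 1) g = none := by
                rw [inner_fuel l g l.length (pos + 1) (by omega) (by omega)]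
                exact hin
              rw [outer_dead l f (pos + 1) acc (by omega) (by
                  rw [inner_fuel l f l.length (pos + 1) (by omega) (by omega)]; exact hin),
                scan_dead l g (pos + 1) pos acc (by omega) hin']
      · rw [if_neg (show ¬(l.getD pos ' ' = '$' ∧ isEscapedA l pos = true) by tauto),
          if_neg (show ¬((l.drop pos).take 2 = ['$', '$']) by rw [slice_iff l pos hp]; tauto),
          if_neg hc,
          if_neg (show ¬(l.getD pos ' ' = '$' ∧ (escAux l 0).getD pos false = false) by tauto)]
        exact ih g (pos + 1) acc (by omega) (by omega)
    · cases g with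
      | zero =>
        simp only [outerA, scanB]
        rw [if_neg hp]
      | succ g =>
        simp only [outerA, scanB]
        rw [if_neg hp, if_neg hp]

-- ===== VERDICT (by name: the statement is the Claim_ definition above) =====
theorem find_inline_math_py_spec : Claim_equal_find_inline_math_py := by
  intro line _
  unfold Spec_find_inline_math_py find_inline_math_py find_inline_math_py_alt
  exact outer_eq_scan line.toList line.toList.length line.toList.length 0 [] (by omega) (by omega)
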